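-- pv_equiv track=rewrite | github.com/Intelligent-CAT-Lab/FlakyDoctor | src/repair_flakiness.py | analyze_nondex_test_result
-- ===== SOURCE A (Python) =====
-- def analyze_nondex_test_result(output):
--     all_test_results = []
--     output_list = output.split("\n")
--     for line in output_list:
--         if "Tests run: 1, Failures: 0, Errors: 0, Skipped: 0" in line:
--             all_test_results.append("test_pass")
--         elif "Tests run: 1, Failures: 1, Errors: 0, Skipped: 0" in line:
--             all_test_results.append("test_failure")
--         elif "Tests run: 1, Failures: 0, Errors: 1, Skipped: 0" in line:
--             all_test_results.append("test_failure")
--     if len(all_test_results) == 0: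
--         if "COMPILATION ERROR" in output:
--             return "compilation_error"
--         elif "BUILD FAILURE" in output:
--             return "build_failure"
--         elif "processing the POMs" in output:
--             return "pom_error"
--         else:
--             return "build_failure"
--     if "test_pass" in all_test_results and "test_failure" not in all_test_results:
--         return "test_pass"
--     else:
--         return "test_failure"
-- ===== SOURCE B (Python) =====
-- def analyze_nondex_test_result(output):
--     # No line loop: the summary needles contain no newline, so a per-line
--     # membership scan is equivalent to a whole-output substring check.
--     passed = "Tests run: 1, Failures: 0, Errors: 0, Skipped: 0" in output
--     failed = ("Tests run: 1, Failures: 1, Errors: 0, Skipped: 0" in output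
--               or "Tests run: 1, Failures: 0, Errors: 1, Skipped: 0" in output)
--     if passed or failed:
--         return "test_pass" if passed and not failed else "test_failure"
--     if "COMPILATION ERROR" in output:
--         return "compilation_error"
--     if "BUILD FAILURE" in output:
--         return "build_failure"
--     if "processing the POMs" in output:
--         return "pom_error"
--     return "build_failure"
-- ===== Notes on version B (the rewrite author's own statement) =====
-- stated objective: simpler
-- what changed: B drops the line split, the per-line loop and the accumulated result list entirely: because none of the three summary needles contains a newline, it classifies with three whole-output substring tests and a direct conditional.
import Mathlib
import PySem

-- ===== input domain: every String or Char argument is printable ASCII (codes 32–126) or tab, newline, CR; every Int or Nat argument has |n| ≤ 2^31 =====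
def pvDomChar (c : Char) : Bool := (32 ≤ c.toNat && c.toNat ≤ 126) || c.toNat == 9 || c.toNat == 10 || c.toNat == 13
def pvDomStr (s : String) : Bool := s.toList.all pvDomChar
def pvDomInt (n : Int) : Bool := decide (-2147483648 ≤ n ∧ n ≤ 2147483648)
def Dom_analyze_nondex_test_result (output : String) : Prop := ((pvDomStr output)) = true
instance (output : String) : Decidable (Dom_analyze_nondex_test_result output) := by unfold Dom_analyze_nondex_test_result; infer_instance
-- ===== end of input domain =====

-- B drops A's line split / loop / result list: the summary needles contain no newline,
-- so three whole-output substring tests classify identically (objective: simpler).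

-- ===== PORT A =====
def analyze_nondex_test_result (output : String) : String :=
  let output_list := (PySem.Str.split? output "\n").getD []
  let all_test_results := output_list.foldl (fun acc line =>
    if PySem.Str.isIn "Tests run: 1, Failures: 0, Errors: 0, Skipped: 0" line then
      acc ++ ["test_pass"]
    else if PySem.Str.isIn "Tests run: 1, Failures: 1, Errors: 0, Skipped: 0" line then
      acc ++ ["test_failure"]
    else if PySem.Str.isIn "Tests run: 1, Failures: 0, Errors: 1, Skipped: 0" line then
      acc ++ ["test_failure"]
    else acc) ([] : List String)
  if all_test_results.length = 0 then
    if PySem.Str.isIn "COMPILATION ERROR" output then "compilation_error"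
    else if PySem.Str.isIn "BUILD FAILURE" output then "build_failure"
    else if PySem.Str.isIn "processing the POMs" output then "pom_error"
    else "build_failure"
  else
    if all_test_results.contains "test_pass" && !(all_test_results.contains "test_failure") then
      "test_pass"
    else "test_failure"

-- ===== PORT B =====
def analyze_nondex_test_result_alt (output : String) : String :=
  let passed := PySem.Str.isIn "Tests run: 1, Failures: 0, Errors: 0, Skipped: 0" output
  let failed := PySem.Str.isIn "Tests run: 1, Failures: 1, Errors: 0, Skipped: 0" output
             || PySem.Str.isIn "Tests run: 1, Failures: 0, Errors: 1, Skipped: 0" output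
  if passed || failed then
    if passed && !failed then "test_pass" else "test_failure"
  else if PySem.Str.isIn "COMPILATION ERROR" output then "compilation_error"
  else if PySem.Str.isIn "BUILD FAILURE" output then "build_failure"
  else if PySem.Str.isIn "processing the POMs" output then "pom_error"
  else "build_failure"

-- ===== PRECONDITION & SPEC =====
-- Pre_ excludes outputs in which one single line contains both the pass summary and a
-- failure summary: there A's per-line elif arbitrarily counts the line as a pass while
-- B counts the failure, and neither reading is specified.
def Pre_analyze_nondex_test_result (output : String) : Prop :=
  ∀ line ∈ (PySem.Str.split? output "\n").getD [],
    ¬(PySem.Str.isIn "Tests run: 1, Failures: 0, Errors: 0, Skipped: 0" line = true ∧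
      (PySem.Str.isIn "Tests run: 1, Failures: 1, Errors: 0, Skipped: 0" line = true ∨
       PySem.Str.isIn "Tests run: 1, Failures: 0, Errors: 1, Skipped: 0" line = true))
instance (output : String) : Decidable (Pre_analyze_nondex_test_result output) := by
  unfold Pre_analyze_nondex_test_result; infer_instance

def pvWitness_analyze_nondex_test_result : String := "ok"

def Spec_analyze_nondex_test_result (output : String) (out : String) : Prop :=
  out = analyze_nondex_test_result_alt output
instance (output : String) (out : String) : Decidable (Spec_analyze_nondex_test_result output out) := by
  unfold Spec_analyze_nondex_test_result; infer_instance

-- ===== CLAIM (what is proved, stated in full; the proofs are below) =====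
def Claim_equal_analyze_nondex_test_result : Prop :=
  ∀ (output : String), Dom_analyze_nondex_test_result output →
    Pre_analyze_nondex_test_result output →
    Spec_analyze_nondex_test_result output (analyze_nondex_test_result output)

-- ===== LEMMAS AND PROOFS =====

def pvS (cs : List Char) : List (List Char) := List.splitOnP (· == '\n') cs

theorem pvS_nil : pvS [] = [[]] := by simp [pvS, List.splitOnP_nil]

theorem pvS_cons_nl (rest : List Char) : pvS ('\n' :: rest) = [] :: pvS rest := by
  simp [pvS, List.splitOnP_cons]

theorem pvS_cons {c : Char} (rest : List Char) (hc : c ≠ '\n') :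
    pvS (c :: rest) = (pvS rest).modifyHead (c :: ·) := by
  simp [pvS, List.splitOnP_cons, hc]

theorem pv_go_spec (fuel : Nat) : ∀ (l cur : List Char) (acc : List (List Char)), l.length < fuel →
    PySem.Chars.splitOn.go ['\n'] fuel l cur acc = acc.reverse ++ (pvS l).modifyHead (cur.reverse ++ ·) := by
  induction fuel with
  | zero => intro l cur acc h; omega
  | succ f ih =>
    intro l cur acc h
    cases l with
    | nil => simp [PySem.Chars.splitOn.go, pvS, List.splitOnP_nil]
    | cons c rest =>
      by_cases hc : c = '\n'
      · subst hc
        have hp : List.isPrefixOf ['\n'] ('\n'::rest) = true := by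
          simp [List.isPrefixOf]
        rw [show PySem.Chars.splitOn.go ['\n'] (f+1) ('\n'::rest) cur acc
              = PySem.Chars.splitOn.go ['\n'] f (List.drop (['\n'] : List Char).length ('\n'::rest)) [] (cur.reverse :: acc) from by
          simp [PySem.Chars.splitOn.go, hp]]
        rw [ih _ _ _ (by simpa using Nat.lt_of_succ_lt_succ h)]
        simp [pvS_cons_nl]
        exact congrFun List.modifyHead_id _
      · have hp : List.isPrefixOf ['\n'] (c::rest) = false := by
          simp [List.isPrefixOf]; exact fun h => absurd h.symm hc
        rw [show PySem.Chars.splitOn.go ['\n'] (f+1) (c::rest) cur acc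
              = PySem.Chars.splitOn.go ['\n'] f rest (c :: cur) acc from by
          simp [PySem.Chars.splitOn.go, hp]]
        rw [ih _ _ _ (by simpa using Nat.lt_of_succ_lt_succ h)]
        simp [pvS_cons rest hc, List.modifyHead_modifyHead]
        rfl

theorem pv_splitOn_eq (cs : List Char) : PySem.Chars.splitOn cs ['\n'] = pvS cs := by
  have := pv_go_spec (cs.length + 1) cs [] [] (by omega)
  rw [PySem.Chars.splitOn]
  simpa using this.trans (congrFun List.modifyHead_id _)

theorem pv_pieces : ∀ cs : List Char, ∃ h t, pvS cs = h :: t ∧ h <+: cs ∧ ∀ p ∈ h :: t, p <:+: cs := by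
  intro cs
  induction cs with
  | nil => exact ⟨[], [], pvS_nil, by simp, by simp⟩
  | cons c rest ih =>
    obtain ⟨h, t, hS, hpre, hinf⟩ := ih
    by_cases hc : c = '\n'
    · subst hc
      refine ⟨[], h :: t, by rw [pvS_cons_nl, hS], by simp, ?_⟩
      intro p hp
      rcases List.mem_cons.mp hp with rfl | hp
      · simp
      · exact (hinf p hp).trans (List.infix_cons (List.infix_refl _))
    · refine ⟨c :: h, t, by rw [pvS_cons rest hc, hS]; rfl, by simpa using hpre, ?_⟩
      intro p hp
      rcases List.mem_cons.mp hp with rfl | hp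
      · exact (List.cons_prefix_cons.mpr ⟨rfl, hpre⟩).isInfix
      · exact (hinf p (List.mem_cons_of_mem _ hp)).trans (List.infix_cons (List.infix_refl _))

theorem pv_prefix_head : ∀ (sub cs : List Char), '\n' ∉ sub → sub <+: cs →
    ∃ h t, pvS cs = h :: t ∧ sub <+: h := by
  intro sub
  induction sub with
  | nil =>
    intro cs _ _
    obtain ⟨h, t, hS, _, _⟩ := pv_pieces cs
    exact ⟨h, t, hS, by simp⟩
  | cons a s' ih =>
    intro cs hnl hpre
    cases cs with
    | nil => simp at hpre
    | cons c rest =>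
      obtain ⟨rfl, hpre'⟩ := List.cons_prefix_cons.mp hpre
      have ha : a ≠ '\n' := fun h => hnl (h ▸ List.mem_cons_self)
      obtain ⟨h, t, hS, hsub⟩ := ih rest (fun hm => hnl (List.mem_cons_of_mem _ hm)) hpre'
      exact ⟨a :: h, t, by rw [pvS_cons rest ha, hS]; rfl, List.cons_prefix_cons.mpr ⟨rfl, hsub⟩⟩

theorem pv_bridge (sub : List Char) (hnl : '\n' ∉ sub) :
    ∀ cs, (∃ p ∈ pvS cs, sub <:+: p) ↔ sub <:+: cs := by
  intro cs
  constructor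
  · rintro ⟨p, hp, hsp⟩
    obtain ⟨h, t, hS, _, hinf⟩ := pv_pieces cs
    exact hsp.trans (hinf p (hS ▸ hp))
  · intro hin
    induction cs with
    | nil =>
      have : sub = [] := List.eq_nil_of_infix_nil hin
      subst this
      exact ⟨[], by simp [pvS_nil]⟩
    | cons c rest ih =>
      rcases List.infix_cons_iff.mp hin with hpre | hinf
      · by_cases hc : c = '\n'
        · subst hc
          have hsub : sub = [] := by
            cases sub with
            | nil => rfl
            | cons a s' =>
              obtain ⟨rfl, _⟩ := List.cons_prefix_cons.mp hpre
              exact absurd List.mem_cons_self hnl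
          subst hsub
          obtain ⟨h, t, hS, _, _⟩ := pv_pieces ('\n'::rest)
          exact ⟨h, by simp [hS]⟩
        · obtain ⟨h, t, hS, hsub⟩ := pv_prefix_head sub (c::rest) hnl hpre
          exact ⟨h, by simp [hS], hsub.isInfix⟩
      · obtain ⟨p, hp, hsp⟩ := ih hinf
        obtain ⟨h, t, hS, hpre', hinf'⟩ := pv_pieces rest
        by_cases hc : c = '\n'
        · subst hc
          exact ⟨p, by rw [pvS_cons_nl]; exact List.mem_cons_of_mem _ hp, hsp⟩
        · rw [hS] at hp
          rcases List.mem_cons.mp hp with rfl | hpt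
          · exact ⟨c :: p, by rw [pvS_cons rest hc, hS]; exact List.mem_cons_self,
              hsp.trans (List.infix_cons (List.infix_refl _))⟩
          · exact ⟨p, by rw [pvS_cons rest hc, hS]; exact List.mem_cons_of_mem _ hpt, hsp⟩

-- the lines A iterates over, at the string level
theorem pv_lines_eq (output : String) :
    (PySem.Str.split? output "\n").getD [] =
      (pvS output.toList).map String.ofList := by
  have hsep : ("\n" : String).toList = ['\n'] := by decide
  simp [PySem.Str.split?, PySem.Chars.split?, hsep, pv_splitOn_eq]

-- a needle with no newline is in some line iff it is in the whole output
theorem pv_exists_line (nd : String) (hnl : '\n' ∉ nd.toList) (output : String) :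
    (∃ l ∈ (PySem.Str.split? output "\n").getD [], PySem.Str.isIn nd l = true) ↔
      PySem.Str.isIn nd output = true := by
  rw [pv_lines_eq, PySem.Str.isIn_iff_infix, ← pv_bridge nd.toList hnl output.toList]
  constructor
  · rintro ⟨l, hl, hin⟩
    obtain ⟨p, hp, rfl⟩ := List.mem_map.mp hl
    exact ⟨p, hp, by simpa using (PySem.Str.isIn_iff_infix _ _).mp hin⟩
  · rintro ⟨p, hp, hin⟩
    exact ⟨String.ofList p, List.mem_map_of_mem hp, (PySem.Str.isIn_iff_infix _ _).mpr (by simpa using hin)⟩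

-- A's loop builds acc ++ filterMap classify
theorem pv_foldl (p q r : String → Bool) : ∀ (lines : List String) (acc : List String),
    lines.foldl (fun acc line =>
        if p line then acc ++ ["test_pass"]
        else if q line then acc ++ ["test_failure"]
        else if r line then acc ++ ["test_failure"]
        else acc) acc
      = acc ++ lines.filterMap (fun line =>
          if p line then some "test_pass"
          else if q line then some "test_failure"
          else if r line then some "test_failure"
          else none) := by
  intro lines
  induction lines with
  | nil => intro acc; simp
  | cons l ls ih =>
    intro acc
    simp only [List.foldl_cons, List.filterMap_cons]
    split_ifs <;> simp [ih]

-- ===== VERDICT (by name: the statement is the Claim_ definition above) =====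

theorem pv_core (p q r : String → Bool) (lines : List String) (P Q R : Bool)
    (hbp : (∃ l ∈ lines, p l = true) ↔ P = true)
    (hbq : (∃ l ∈ lines, q l = true) ↔ Q = true)
    (hbr : (∃ l ∈ lines, r l = true) ↔ R = true)
    (hpre : ∀ l ∈ lines, ¬(p l = true ∧ (q l = true ∨ r l = true)))
    (fallback : String) :
    (if (lines.filterMap (fun line =>
          if p line then some "test_pass"
          else if q line then some "test_failure"
          else if r line then some "test_failure"
          else none) : List String).length = 0 then fallback
     else if ((lines.filterMap (fun line =>
          if p line then some "test_pass"
          else if q line then some "test_failure"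
          else if r line then some "test_failure"
          else none)).contains "test_pass" &&
        !((lines.filterMap (fun line =>
          if p line then some "test_pass"
          else if q line then some "test_failure"
          else if r line then some "test_failure"
          else none)).contains "test_failure")) then "test_pass" else "test_failure")
    = (if (P || (Q || R)) then (if (P && !(Q || R)) then "test_pass" else "test_failure") else fallback) := by
  set res := lines.filterMap (fun line =>
      if p line then some "test_pass"
      else if q line then some "test_failure"
      else if r line then some "test_failure"
      else none) with hres
  have hm1 : "test_pass" ∈ res ↔ P = true := by
    rw [hres, List.mem_filterMap, ← hbp]
    constructor
    · rintro ⟨l, hl, hcl⟩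
      refine ⟨l, hl, ?_⟩
      by_cases h1 : p l = true
      · exact h1
      · simp [h1] at hcl; split_ifs at hcl <;> simp_all
    · rintro ⟨l, hl, hisin⟩
      exact ⟨l, hl, by simp [hisin]⟩
  have hm2 : "test_failure" ∈ res ↔ (Q = true ∨ R = true) := by
    rw [hres, List.mem_filterMap]
    constructor
    · rintro ⟨l, hl, hcl⟩
      by_cases h1 : p l = true
      · simp [h1] at hcl
      · simp [h1] at hcl
        by_cases h2 : q l = true
        · exact Or.inl (hbq.mp ⟨l, hl, h2⟩)
        · simp [h2] at hcl
          by_cases h3 : r l = true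
          · exact Or.inr (hbr.mp ⟨l, hl, h3⟩)
          · simp [h3] at hcl
    · intro hqr
      have hex : ∃ l ∈ lines, q l = true ∨ r l = true := by
        rcases hqr with h | h
        · obtain ⟨l, hl, hil⟩ := hbq.mpr h; exact ⟨l, hl, Or.inl hil⟩
        · obtain ⟨l, hl, hil⟩ := hbr.mpr h; exact ⟨l, hl, Or.inr hil⟩
      obtain ⟨l, hl, hil⟩ := hex
      have hnp : ¬ p l = true := fun hpl => hpre l hl ⟨hpl, hil⟩
      refine ⟨l, hl, ?_⟩
      rcases hil with h | h
      · simp [hnp, h]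
      · by_cases h2 : q l = true <;> simp [hnp, h2, h]
  have he : res = [] ↔ (¬ P = true ∧ ¬ Q = true ∧ ¬ R = true) := by
    rw [hres, List.filterMap_eq_nil_iff, ← hbp]
    constructor
    · intro hall
      refine ⟨?_, ?_, ?_⟩
      · rintro ⟨l, hl, hil⟩
        have := hall l hl; simp [hil] at this
      · intro h
        obtain ⟨l, hl, hil⟩ := hbq.mpr h
        have := hall l hl
        split_ifs at this
      · intro h
        obtain ⟨l, hl, hil⟩ := hbr.mpr h
        have := hall l hl
        split_ifs at this
    · rintro ⟨h1, h2, h3⟩ l hl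
      have hnp : ¬ p l = true := fun hh => h1 ⟨l, hl, hh⟩
      have hnq : ¬ q l = true := fun hh => h2 (hbq.mp ⟨l, hl, hh⟩)
      have hnr : ¬ r l = true := fun hh => h3 (hbr.mp ⟨l, hl, hh⟩)
      simp [hnp, hnq, hnr]
  clear_value res
  cases P <;> cases Q <;> cases R <;>
    simp_all [List.length_eq_zero_iff]

theorem analyze_nondex_test_result_spec : Claim_equal_analyze_nondex_test_result := by
  unfold Claim_equal_analyze_nondex_test_result
  intro output _ hpre
  unfold Spec_analyze_nondex_test_result
  unfold analyze_nondex_test_result analyze_nondex_test_result_alt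
  show (if (((PySem.Str.split? output "\n").getD []).foldl (fun acc line =>
          if PySem.Str.isIn "Tests run: 1, Failures: 0, Errors: 0, Skipped: 0" line then acc ++ ["test_pass"]
          else if PySem.Str.isIn "Tests run: 1, Failures: 1, Errors: 0, Skipped: 0" line then acc ++ ["test_failure"]
          else if PySem.Str.isIn "Tests run: 1, Failures: 0, Errors: 1, Skipped: 0" line then acc ++ ["test_failure"]
          else acc) ([] : List String)).length = 0 then _ else _) = _
  rw [pv_foldl (fun line => PySem.Str.isIn "Tests run: 1, Failures: 0, Errors: 0, Skipped: 0" line)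
        (fun line => PySem.Str.isIn "Tests run: 1, Failures: 1, Errors: 0, Skipped: 0" line)
        (fun line => PySem.Str.isIn "Tests run: 1, Failures: 0, Errors: 1, Skipped: 0" line)
        ((PySem.Str.split? output "\n").getD []) []]
  exact pv_core _ _ _ _ _ _ _
    (pv_exists_line "Tests run: 1, Failures: 0, Errors: 0, Skipped: 0" (by decide) output)
    (pv_exists_line "Tests run: 1, Failures: 1, Errors: 0, Skipped: 0" (by decide) output)
    (pv_exists_line "Tests run: 1, Failures: 0, Errors: 1, Skipped: 0" (by decide) output)
    hpre _
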